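-- pv_equiv track=rewrite | github.com/CodeEventHorizon/ce151 | assignment1.py | fun_exercise_7
-- ===== SOURCE A (Python) =====
-- def fun_exercise_7(x):
--     ptr = -1
--     if len(x) <= 1:
--         return ptr
--     for i in range(len(x)):
--         for j in range(len(x)):
--             if i == j:
--                 continue
--             elif x[i] in x[j]:
--                 ptr = i
--                 return ptr
--     return ptr
-- ===== SOURCE B (Python) =====
-- def fun_exercise_7(x):
--     if len(x) <= 1:
--         return -1
--     # distinct strings, first-occurrence order
--     uniq = list(dict.fromkeys(x))
--     # a string occurring twice is a substring of its twin
--     qual = set()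
--     for s in uniq:
--         if x.count(s) > 1:
--             qual.add(s)
--     # each unordered pair of DISTINCT strings is examined once
--     for k in range(len(uniq)):
--         s = uniq[k]
--         for t in uniq[k + 1:]:
--             if s in t:
--                 qual.add(s)
--             elif t in s:
--                 qual.add(t)
--     # first (= minimal) index whose string qualifies
--     for i, s in enumerate(x):
--         if s in qual:
--             return i
--     return -1
-- ===== Notes on version B (the rewrite author's own statement) =====
-- stated objective: alternative
-- what changed: Instead of A's early-returning double index scan with an i==j skip, B first computes the SET of qualifying strings (duplicates via a count pass over the deduplicated list, substring relations via one pass over unordered pairs of distinct strings, each pair tested once in both directions) and then takes the first index whose string is in that set in a single enumerate scan.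
import Mathlib
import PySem

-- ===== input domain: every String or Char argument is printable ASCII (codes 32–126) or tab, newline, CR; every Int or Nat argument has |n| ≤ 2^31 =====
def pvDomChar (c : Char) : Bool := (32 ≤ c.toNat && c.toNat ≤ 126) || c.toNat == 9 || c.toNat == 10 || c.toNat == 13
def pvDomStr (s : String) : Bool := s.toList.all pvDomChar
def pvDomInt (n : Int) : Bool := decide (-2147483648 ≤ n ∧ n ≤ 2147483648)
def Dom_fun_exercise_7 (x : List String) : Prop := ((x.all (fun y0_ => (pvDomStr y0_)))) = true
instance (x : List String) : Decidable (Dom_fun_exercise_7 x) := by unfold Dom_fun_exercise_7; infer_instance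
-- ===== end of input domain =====

-- B replaces A's early-returning double index scan (with its i == j skip) by a staged computation:
-- build the set of qualifying strings (duplicates + one pass over unordered pairs of distinct strings),
-- then one enumerate scan for the first index whose string is in the set (objective: alternative).

-- ===== PORT A =====
-- A's inner loop 'for j in range(len(x)): if i == j: continue; elif x[i] in x[j]: return i'
def pvAInner (x : List String) (i : Nat) : List Nat → Bool
  | [] => false
  | j :: js =>
    if i = j then pvAInner x i js
    else if PySem.Str.isIn (PySem.List.pyGetD x (i : Int) "") (PySem.List.pyGetD x (j : Int) "") then
      true
    else pvAInner x i js

-- A's outer loop 'for i in range(len(x))': first i on which the inner loop returns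
def pvALoop (x : List String) : List Nat → Option Int
  | [] => none
  | i :: is => if pvAInner x i (List.range x.length) then some (i : Int) else pvALoop x is

def fun_exercise_7 (x : List String) : Int :=
  let ptr : Int := -1
  if x.length ≤ 1 then ptr
  else
    match pvALoop x (List.range x.length) with
    | some p => p
    | none => ptr

-- ===== PORT B =====
-- 'qual = set(); for s in uniq: if x.count(s) > 1: qual.add(s)'
def pvDupSet (x uniq : List String) : PySem.Set String :=
  uniq.foldl (fun q s => if 1 < PySem.List.count x s then PySem.Set.add q s else q)
    PySem.Set.empty

-- 'for t in uniq[k+1:]: if s in t: qual.add(s) elif t in s: qual.add(t)'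
def pvPairStep (q : PySem.Set String) (s : String) (rest : List String) : PySem.Set String :=
  rest.foldl (fun q t =>
    if PySem.Str.isIn s t then PySem.Set.add q s
    else if PySem.Str.isIn t s then PySem.Set.add q t
    else q) q

-- 'for k in range(len(uniq)): s = uniq[k]; <inner loop over uniq[k+1:]>'
def pvPairLoop (q : PySem.Set String) : List String → PySem.Set String
  | [] => q
  | s :: rest => pvPairLoop (pvPairStep q s rest) rest

-- 'for i, s in enumerate(x): if s in qual: return i'
def pvScan (qual : PySem.Set String) : List String → Nat → Int
  | [], _ => -1
  | s :: rest, i => if PySem.Set.contains qual s then (i : Int) else pvScan qual rest (i + 1)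

def fun_exercise_7_alt (x : List String) : Int :=
  if x.length ≤ 1 then -1
  else
    let uniq := PySem.List.dedup x
    let qual := pvPairLoop (pvDupSet x uniq) uniq
    pvScan qual x 0

-- ===== PRECONDITION & SPEC =====
def Spec_fun_exercise_7 (x : List String) (out : Int) : Prop := out = fun_exercise_7_alt x
instance (x : List String) (out : Int) : Decidable (Spec_fun_exercise_7 x out) := by unfold Spec_fun_exercise_7; infer_instance

-- ===== CLAIM (what is proved, stated in full; the proofs are below) =====
def Claim_equal_fun_exercise_7 : Prop := ∀ (x : List String), Dom_fun_exercise_7 x → Spec_fun_exercise_7 x (fun_exercise_7 x)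

-- ===== LEMMAS AND PROOFS =====

lemma pvAInner_iff (x : List String) (i : Nat) (l : List Nat) :
    pvAInner x i l = true ↔
      ∃ j ∈ l, j ≠ i ∧ PySem.Str.isIn (x.getD i "") (x.getD j "") = true := by
  induction l with
  | nil => simp [pvAInner]
  | cons j js ih =>
    simp only [pvAInner, PySem.List.pyGetD_natCast]
    split_ifs with h1 h2
    · subst h1
      rw [ih]
      constructor
      · rintro ⟨j', hm, hne, hin⟩
        exact ⟨j', List.mem_cons_of_mem _ hm, hne, hin⟩
      · rintro ⟨j', hm, hne, hin⟩
        rcases List.mem_cons.1 hm with h | h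
        · exact absurd h hne
        · exact ⟨j', h, hne, hin⟩
    · simp only [true_iff]
      exact ⟨j, List.mem_cons_self, fun h => h1 h.symm, h2⟩
    · rw [ih]
      constructor
      · rintro ⟨j', hm, hne, hin⟩
        exact ⟨j', List.mem_cons_of_mem _ hm, hne, hin⟩
      · rintro ⟨j', hm, hne, hin⟩
        rcases List.mem_cons.1 hm with h | h
        · subst h; exact absurd hin h2
        · exact ⟨j', h, hne, hin⟩

-- two distinct strings cannot be substrings of each other
lemma pvIsIn_antisymm {s t : String}
    (h1 : PySem.Str.isIn s t = true) (h2 : PySem.Str.isIn t s = true) : s = t := by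
  have i1 := (PySem.Str.isIn_iff_infix _ _).1 h1
  have i2 := (PySem.Str.isIn_iff_infix _ _).1 h2
  exact String.toList_inj.1 (i1.eq_of_length (Nat.le_antisymm i1.length_le i2.length_le))

lemma pvMem_dupSet (x : List String) (u : String) (uniq : List String) :
    u ∈ pvDupSet x uniq ↔ u ∈ uniq ∧ 1 < PySem.List.count x u := by
  suffices h : ∀ (q : PySem.Set String) (l : List String),
      u ∈ l.foldl (fun q s => if 1 < PySem.List.count x s then PySem.Set.add q s else q) q ↔
        u ∈ q ∨ (u ∈ l ∧ 1 < PySem.List.count x u) by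
    have := h PySem.Set.empty uniq
    simpa [pvDupSet, PySem.Set.empty] using this
  intro q l
  induction l generalizing q with
  | nil => simp
  | cons s rest ih =>
    simp only [List.foldl_cons, ih]
    by_cases hc : 1 < PySem.List.count x s
    · simp only [if_pos hc, PySem.Set.mem_add]
      constructor
      · rintro (⟨h | rfl⟩ | ⟨hm, hcnt⟩)
        · exact Or.inl h
        · exact Or.inr ⟨List.mem_cons_self, hc⟩
        · exact Or.inr ⟨List.mem_cons_of_mem _ hm, hcnt⟩
      · rintro (h | ⟨hm, hcnt⟩)
        · exact Or.inl (Or.inl h)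
        · rcases List.mem_cons.1 hm with rfl | hm'
          · exact Or.inl (Or.inr rfl)
          · exact Or.inr ⟨hm', hcnt⟩
    · simp only [if_neg hc]
      constructor
      · rintro (h | ⟨hm, hcnt⟩)
        · exact Or.inl h
        · exact Or.inr ⟨List.mem_cons_of_mem _ hm, hcnt⟩
      · rintro (h | ⟨hm, hcnt⟩)
        · exact Or.inl h
        · rcases List.mem_cons.1 hm with rfl | hm'
          · exact absurd hcnt hc
          · exact Or.inr ⟨hm', hcnt⟩

lemma pvMem_pairStep (q : PySem.Set String) (s : String) (rest : List String) (u : String) :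
    u ∈ pvPairStep q s rest ↔
      u ∈ q ∨ (u = s ∧ ∃ t ∈ rest, PySem.Str.isIn s t = true) ∨
        (u ∈ rest ∧ PySem.Str.isIn s u = false ∧ PySem.Str.isIn u s = true) := by
  unfold pvPairStep
  induction rest generalizing q with
  | nil => simp
  | cons t ts ih =>
    simp only [List.foldl_cons, ih]
    by_cases h1 : PySem.Str.isIn s t = true
    · simp only [if_pos h1, PySem.Set.mem_add]
      constructor
      · rintro (⟨h | rfl⟩ | ⟨rfl, t', ht', hin⟩ | ⟨hm, hf, hin⟩)
        · exact Or.inl h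
        · exact Or.inr (Or.inl ⟨rfl, t, List.mem_cons_self, h1⟩)
        · exact Or.inr (Or.inl ⟨rfl, t', List.mem_cons_of_mem _ ht', hin⟩)
        · exact Or.inr (Or.inr ⟨List.mem_cons_of_mem _ hm, hf, hin⟩)
      · rintro (h | ⟨rfl, t', ht', hin⟩ | ⟨hm, hf, hin⟩)
        · exact Or.inl (Or.inl h)
        · exact Or.inl (Or.inr rfl)
        · rcases List.mem_cons.1 hm with rfl | hm'
          · rw [h1] at hf; cases hf
          · exact Or.inr (Or.inr ⟨hm', hf, hin⟩)
    · rw [if_neg h1]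
      by_cases h2 : PySem.Str.isIn t s = true
      · simp only [if_pos h2, PySem.Set.mem_add]
        constructor
        · rintro (⟨h | rfl⟩ | ⟨rfl, t', ht', hin⟩ | ⟨hm, hf, hin⟩)
          · exact Or.inl h
          · exact Or.inr (Or.inr ⟨List.mem_cons_self, Bool.eq_false_iff.2 h1, h2⟩)
          · exact Or.inr (Or.inl ⟨rfl, t', List.mem_cons_of_mem _ ht', hin⟩)
          · exact Or.inr (Or.inr ⟨List.mem_cons_of_mem _ hm, hf, hin⟩)
        · rintro (h | ⟨rfl, t', ht', hin⟩ | ⟨hm, hf, hin⟩)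
          · exact Or.inl (Or.inl h)
          · rcases List.mem_cons.1 ht' with rfl | ht''
            · exact absurd hin h1
            · exact Or.inr (Or.inl ⟨rfl, t', ht'', hin⟩)
          · rcases List.mem_cons.1 hm with rfl | hm'
            · exact Or.inl (Or.inr rfl)
            · exact Or.inr (Or.inr ⟨hm', hf, hin⟩)
      · rw [if_neg h2]
        constructor
        · rintro (h | ⟨rfl, t', ht', hin⟩ | ⟨hm, hf, hin⟩)
          · exact Or.inl h
          · exact Or.inr (Or.inl ⟨rfl, t', List.mem_cons_of_mem _ ht', hin⟩)
          · exact Or.inr (Or.inr ⟨List.mem_cons_of_mem _ hm, hf, hin⟩)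
        · rintro (h | ⟨rfl, t', ht', hin⟩ | ⟨hm, hf, hin⟩)
          · exact Or.inl h
          · rcases List.mem_cons.1 ht' with rfl | ht''
            · exact absurd hin h1
            · exact Or.inr (Or.inl ⟨rfl, t', ht'', hin⟩)
          · rcases List.mem_cons.1 hm with rfl | hm'
            · exact absurd hin h2
            · exact Or.inr (Or.inr ⟨hm', hf, hin⟩)

lemma pvMem_pairLoop (u : String) :
    ∀ (l : List String) (q : PySem.Set String), l.Nodup →
      (u ∈ pvPairLoop q l ↔
        u ∈ q ∨ (u ∈ l ∧ ∃ t ∈ l, t ≠ u ∧ PySem.Str.isIn u t = true)) := by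
  intro l
  induction l with
  | nil => simp [pvPairLoop]
  | cons s rest ih =>
    intro q hnd
    have hs : s ∉ rest := (List.nodup_cons.1 hnd).1
    have hrest : rest.Nodup := (List.nodup_cons.1 hnd).2
    rw [pvPairLoop, ih _ hrest, pvMem_pairStep]
    constructor
    · rintro ((h | ⟨rfl, t, ht, hin⟩ | ⟨hm, _, hin⟩) | ⟨hm, t, ht, hne, hin⟩)
      · exact Or.inl h
      · refine Or.inr ⟨List.mem_cons_self, t, List.mem_cons_of_mem _ ht, ?_, hin⟩
        rintro rfl; exact hs ht
      · refine Or.inr ⟨List.mem_cons_of_mem _ hm, s, List.mem_cons_self, ?_, hin⟩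
        rintro rfl; exact hs hm
      · exact Or.inr ⟨List.mem_cons_of_mem _ hm, t, List.mem_cons_of_mem _ ht, hne, hin⟩
    · rintro (h | ⟨hm, t, ht, hne, hin⟩)
      · exact Or.inl (Or.inl h)
      · rcases List.mem_cons.1 hm with rfl | hm'
        · rcases List.mem_cons.1 ht with rfl | ht'
          · exact absurd rfl hne
          · exact Or.inl (Or.inr (Or.inl ⟨rfl, t, ht', hin⟩))
        · rcases List.mem_cons.1 ht with rfl | ht'
          · refine Or.inl (Or.inr (Or.inr ⟨hm', ?_, hin⟩))
            by_contra hff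
            have : PySem.Str.isIn t u = true := Bool.not_eq_false _ ▸ Bool.of_not_eq_false hff
            exact hne (pvIsIn_antisymm this hin)
          · exact Or.inr ⟨hm', t, ht', hne, hin⟩

-- the per-index predicate equivalence: A's "substring of some other element"
-- equals membership of x[i] in B's qualifying set
lemma pvCond_eq (x : List String) (i : Nat) (hi : i < x.length) :
    pvAInner x i (List.range x.length) =
      PySem.Set.contains (pvPairLoop (pvDupSet x (PySem.List.dedup x)) (PySem.List.dedup x)) x[i] := by
  rw [Bool.eq_iff_iff, pvAInner_iff, PySem.Set.contains_iff,
    pvMem_pairLoop x[i] (PySem.List.dedup x) _ (PySem.List.nodup_dedup x), pvMem_dupSet]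
  simp only [PySem.List.mem_dedup, PySem.List.count_eq]
  have hsi : x.getD i "" = x[i] := List.getD_eq_getElem x "" hi
  constructor
  · rintro ⟨j, hj, hne, hin⟩
    have hjlt : j < x.length := List.mem_range.1 hj
    rw [hsi, List.getD_eq_getElem x "" hjlt] at hin
    by_cases heq : x[j] = x[i]
    · left
      refine ⟨List.getElem_mem hi, ?_⟩
      have hdup : List.Duplicate x[i] x := by
        rw [List.duplicate_iff_exists_distinct_get]
        rcases Nat.lt_or_gt_of_ne (fun h => hne h) with h | h
        · exact ⟨⟨j, hjlt⟩, ⟨i, hi⟩, h, by simp [heq], by simp⟩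
        · exact ⟨⟨i, hi⟩, ⟨j, hjlt⟩, h, by simp, by simp [heq]⟩
      exact List.duplicate_iff_two_le_count.1 hdup
    · exact Or.inr ⟨List.getElem_mem hi, x[j], List.getElem_mem hjlt, heq, hin⟩
  · have hself : PySem.Str.isIn x[i] x[i] = true :=
      (PySem.Str.isIn_iff_infix _ _).2 (List.infix_refl _)
    rintro (⟨_, hcnt⟩ | ⟨_, t, htm, hne, hin⟩)
    · have hdup : List.Duplicate x[i] x := List.duplicate_iff_two_le_count.2 hcnt
      rcases List.duplicate_iff_exists_distinct_get.1 hdup with ⟨n, m, hnm, hn, hm⟩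
      by_cases hni : (n : Nat) = i
      · refine ⟨m, List.mem_range.2 m.isLt, by omega, ?_⟩
        rw [hsi, List.getD_eq_getElem x "" m.isLt]
        simp only [List.get_eq_getElem] at hm
        rw [← hm]; exact hself
      · refine ⟨n, List.mem_range.2 n.isLt, hni, ?_⟩
        rw [hsi, List.getD_eq_getElem x "" n.isLt]
        simp only [List.get_eq_getElem] at hn
        rw [← hn]; exact hself
    · rcases List.mem_iff_getElem.1 htm with ⟨j, hjlt, rfl⟩
      refine ⟨j, List.mem_range.2 hjlt, ?_, ?_⟩
      · rintro rfl; exact hne rfl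
      · rw [hsi, List.getD_eq_getElem x "" hjlt]; exact hin

lemma pvScan_eq (x : List String) (qual : PySem.Set String)
    (h : ∀ i (_ : i < x.length),
      pvAInner x i (List.range x.length) = PySem.Set.contains qual x[i]) :
    ∀ (l : List String) (i : Nat), x.drop i = l →
      pvScan qual l i =
        (match pvALoop x ((List.range x.length).drop i) with
          | some p => p
          | none => -1) := by
  intro l
  induction l with
  | nil =>
    intro i hdrop
    have hlen : x.length ≤ i := by
      by_contra hlt
      have := List.drop_eq_nil_iff.1 hdrop
      omega
    rw [List.drop_eq_nil_iff.2 (by simpa using hlen)]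
    rfl
  | cons s rest ih =>
    intro i hdrop
    have hi : i < x.length := by
      by_contra hge
      rw [List.drop_eq_nil_iff.2 (by omega)] at hdrop
      cases hdrop
    have hs : x[i] = s := by
      have h2 : x[i]? = some s := by
        have := congrArg (fun l => l.head?) hdrop
        simpa [List.head?_drop] using this
      rw [List.getElem?_eq_getElem hi] at h2
      exact Option.some.inj h2
    have hrange : (List.range x.length).drop i = i :: (List.range x.length).drop (i + 1) := by
      rw [List.drop_eq_getElem_cons (l := List.range x.length) (by simpa using hi)]
      simp
    have hrest : x.drop (i + 1) = rest := by
      have := congrArg List.tail hdrop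
      rwa [List.tail_drop, List.tail_cons] at this
    rw [hrange, pvScan, pvALoop, h i hi, hs]
    split
    · rfl
    · exact ih (i + 1) hrest

-- ===== VERDICT (by name: the statement is the Claim_ definition above) =====
theorem fun_exercise_7_spec : Claim_equal_fun_exercise_7 := by
  intro x _
  unfold Spec_fun_exercise_7 fun_exercise_7 fun_exercise_7_alt
  by_cases hlen : x.length ≤ 1
  · simp [hlen]
  · simp only [if_neg hlen]
    rw [pvScan_eq x _ (fun i hi => pvCond_eq x i hi) x 0 (by simp)]
    simp
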